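-- pv_equiv track=rewrite | github.com/rudikruger0-del/ami-worker | worker.py | severity_from_routes
-- ===== SOURCE A (Python) =====
-- def severity_from_routes(routes: list) -> str:
--     """
--     Determines minimum severity based on dominant clinical routes.
--     Routes OVERRIDE numeric scoring (doctor logic).
--     """
--     if not routes:
--         return "low"
--
--     # Any PRIMARY route = at least HIGH severity
--     for r in routes:
--         if r.get("priority") == "primary":
--             return "high"
--
--     # Any SECONDARY route = at least MODERATE severity
--     for r in routes:
--         if r.get("priority") == "secondary":
--             return "moderate"
--
--     return "low"
-- ===== SOURCE B (Python) =====
-- def severity_from_routes(routes: list) -> str: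
--     """Single pass: early-return 'high' on the first primary, track a secondary flag."""
--     if not routes:
--         return "low"
--     has_secondary = False
--     for r in routes:
--         p = r.get("priority")
--         if p == "primary":
--             return "high"
--         if p == "secondary":
--             has_secondary = True
--     return "moderate" if has_secondary else "low"
-- ===== Notes on version B (the rewrite author's own statement) =====
-- stated objective: alternative
-- what changed: Replaces A's two sequential scans (one for primary, one for secondary) with a single pass that early-returns 'high' on the first primary and carries a has_secondary flag decided after the loop.
import Mathlib
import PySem

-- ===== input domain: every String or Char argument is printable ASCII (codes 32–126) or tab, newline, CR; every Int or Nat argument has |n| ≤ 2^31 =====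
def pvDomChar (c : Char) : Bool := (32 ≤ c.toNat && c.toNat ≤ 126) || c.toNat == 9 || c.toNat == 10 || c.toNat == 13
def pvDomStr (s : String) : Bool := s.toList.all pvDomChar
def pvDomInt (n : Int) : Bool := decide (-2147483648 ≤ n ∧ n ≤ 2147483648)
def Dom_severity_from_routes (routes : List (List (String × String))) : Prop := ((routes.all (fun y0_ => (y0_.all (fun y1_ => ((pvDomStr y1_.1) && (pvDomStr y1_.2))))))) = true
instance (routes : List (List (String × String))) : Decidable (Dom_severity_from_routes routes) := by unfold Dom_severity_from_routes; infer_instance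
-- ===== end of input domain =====

-- B replaces A's two sequential scans by one pass with an early return and a secondary flag (alternative decomposition, same cost).

-- ===== PORT A =====
-- the for-loop "for r in routes: if r.get('priority') == p: return <hit>" as structural recursion
def pvScanA (p : String) : List (List (String × String)) → Bool
  | [] => false
  | r :: rest => if (PySem.Dict.mk r).get? "priority" == some p then true else pvScanA p rest

def severity_from_routes (routes : List (List (String × String))) : String :=
  if routes = [] then "low"
  else if pvScanA "primary" routes then "high"
  else if pvScanA "secondary" routes then "moderate"
  else "low"

-- ===== PORT B =====
-- single pass: early return "high" on primary, carry has_secondary flag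
def pvScanB : List (List (String × String)) → Bool → String
  | [], hasSec => if hasSec then "moderate" else "low"
  | r :: rest, hasSec =>
    let p := (PySem.Dict.mk r).get? "priority"
    if p == some "primary" then "high"
    else pvScanB rest (hasSec || (p == some "secondary"))

def severity_from_routes_alt (routes : List (List (String × String))) : String :=
  if routes = [] then "low"
  else pvScanB routes false

-- ===== PRECONDITION & SPEC =====
def Spec_severity_from_routes (routes : List (List (String × String))) (out : String) : Prop := out = severity_from_routes_alt routes
instance (routes : List (List (String × String))) (out : String) : Decidable (Spec_severity_from_routes routes out) := by unfold Spec_severity_from_routes; infer_instance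

-- ===== CLAIM (what is proved, stated in full; the proofs are below) =====
def Claim_equal_severity_from_routes : Prop := ∀ (routes : List (List (String × String))), Dom_severity_from_routes routes → Spec_severity_from_routes routes (severity_from_routes routes)

-- ===== LEMMAS AND PROOFS =====
theorem pvScanB_eq (routes : List (List (String × String))) (hasSec : Bool) :
    pvScanB routes hasSec =
      if pvScanA "primary" routes then "high"
      else if hasSec || pvScanA "secondary" routes then "moderate"
      else "low" := by
  induction routes generalizing hasSec with
  | nil => simp [pvScanB, pvScanA]
  | cons r rest ih =>
    simp only [pvScanB, pvScanA, ih]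
    by_cases h1 : (PySem.Dict.mk r).get? "priority" == some "primary" <;>
      by_cases h2 : (PySem.Dict.mk r).get? "priority" == some "secondary" <;>
        simp [h1, h2]

-- ===== VERDICT (by name: the statement is the Claim_ definition above) =====
theorem severity_from_routes_spec : Claim_equal_severity_from_routes := by
  intro routes _
  unfold Spec_severity_from_routes severity_from_routes severity_from_routes_alt
  by_cases h : routes = []
  · simp [h]
  · simp [h, pvScanB_eq]
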